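-- pv_equiv track=rewrite | github.com/gomeznico/EulerProblems | problem58/problem58.py | diag_numbers
-- ===== SOURCE A (Python) =====
-- def diag_numbers(n,prev=None):
--     # n number of squares
--     if n == 1: return [1]
--
--     side_len = 2*n -1
--     if prev == None:
--         prev = diag_numbers(n-1)
--     last = max(prev)
--     new = [last+(side_len-1),last+2*(side_len-1),last+3*(side_len-1),last+4*(side_len-1)]
--     out = prev[::] + new
--     return out
-- ===== SOURCE B (Python) =====
-- def diag_numbers(n, prev=None):
--     if n == 1:
--         return [1]
--     if prev is None:
--         out = [1]
--         last = 1
--         for level in range(2, n + 1):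
--             step = 2 * (level - 1)
--             out += [last + step, last + 2 * step, last + 3 * step, last + 4 * step]
--             last += 4 * step
--         return out
--     last = max(prev)
--     step = 2 * (n - 1)
--     return prev + [last + step, last + 2 * step, last + 3 * step, last + 4 * step]
-- ===== Notes on version B (the rewrite author's own statement) =====
-- stated objective: alternative
-- what changed: Replaced the top-down recursion that recomputes max over the whole list at every level by a single iterative pass that appends the four corners per level while tracking the running last value.
import Mathlib
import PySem

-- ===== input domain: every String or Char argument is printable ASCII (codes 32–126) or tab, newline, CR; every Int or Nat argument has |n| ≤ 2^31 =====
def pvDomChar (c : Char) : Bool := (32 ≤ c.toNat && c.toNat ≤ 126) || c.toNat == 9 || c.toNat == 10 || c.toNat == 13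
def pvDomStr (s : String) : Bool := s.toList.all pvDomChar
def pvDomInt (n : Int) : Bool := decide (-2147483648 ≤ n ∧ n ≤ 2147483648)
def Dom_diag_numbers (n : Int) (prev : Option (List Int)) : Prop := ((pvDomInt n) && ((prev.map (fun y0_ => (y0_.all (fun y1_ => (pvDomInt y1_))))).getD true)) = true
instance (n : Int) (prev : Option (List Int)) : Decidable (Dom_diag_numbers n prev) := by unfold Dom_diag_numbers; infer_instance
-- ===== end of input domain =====

-- B replaces A's top-down recursion (which re-computes max over the whole list at every level)
-- by a single iterative pass appending the four corners per level while tracking the last value.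

-- ===== PORT A =====
def diag_numbers (n : Int) (prev : Option (List Int)) : List Int :=
  if n = 1 then [1]
  else
    let side_len := 2*n - 1
    let prevL : List Int :=
      match prev with
      | some l => l
      | none =>
        -- totality guard only: Python recurses without bound for n ≤ 0 (RecursionError, outside Pre_)
        if h : 2 ≤ n then diag_numbers (n-1) none else []
    match PySem.List.max? prevL (fun x => x) with
    | none => []  -- Python: max([]) raises ValueError (outside Pre_)
    | some last =>
        prevL ++ [last+(side_len-1), last+2*(side_len-1), last+3*(side_len-1), last+4*(side_len-1)]
termination_by n.toNat
decreasing_by omega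

-- ===== PORT B =====
def pvLevelStep (st : List Int × Int) (level : Int) : List Int × Int :=
  let step := 2*(level-1)
  (st.1 ++ [st.2+step, st.2+2*step, st.2+3*step, st.2+4*step], st.2+4*step)

def diag_numbers_alt (n : Int) (prev : Option (List Int)) : List Int :=
  if n = 1 then [1]
  else
    match prev with
    | none => ((PySem.List.pyRange 2 (n+1) 1).foldl pvLevelStep ([1], 1)).1
    | some l =>
      match PySem.List.max? l (fun x => x) with
      | none => []  -- Python: max([]) raises ValueError (outside Pre_)
      | some last =>
        let step := 2*(n-1)
        l ++ [last+step, last+2*step, last+3*step, last+4*step]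

-- ===== PRECONDITION & SPEC =====
-- Pre_ excludes exactly the inputs where A raises: RecursionError (prev = None, n ≤ 0)
-- and ValueError from max([]) (prev = some [] with n ≠ 1).
def Pre_diag_numbers (n : Int) (prev : Option (List Int)) : Prop :=
  n = 1 ∨ ((prev = none → 2 ≤ n) ∧ prev ≠ some [])
instance (n : Int) (prev : Option (List Int)) : Decidable (Pre_diag_numbers n prev) := by
  unfold Pre_diag_numbers; infer_instance

def pvWitness_diag_numbers : Int × Option (List Int) := (5, none)

def Spec_diag_numbers (n : Int) (prev : Option (List Int)) (out : List Int) : Prop := out = diag_numbers_alt n prev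
instance (n : Int) (prev : Option (List Int)) (out : List Int) : Decidable (Spec_diag_numbers n prev out) := by unfold Spec_diag_numbers; infer_instance

-- ===== CLAIM (what is proved, stated in full; the proofs are below) =====
def Claim_equal_diag_numbers : Prop := ∀ (n : Int) (prev : Option (List Int)), Dom_diag_numbers n prev → Pre_diag_numbers n prev → Spec_diag_numbers n prev (diag_numbers n prev)

-- ===== LEMMAS AND PROOFS =====

-- strictly larger elements appended after a nonempty list move the running max to the last one
lemma pvMax4 (x : Int) (t : List Int) (a b c d : Int)
    (h1 : t.foldl max x ≤ a) (h2 : a ≤ b) (h3 : b ≤ c) (h4 : c ≤ d) :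
    PySem.List.max? ((x :: t) ++ [a, b, c, d]) (fun y => y) = some d := by
  have : (x :: t) ++ [a, b, c, d] = x :: (t ++ [a, b, c, d]) := rfl
  rw [this, PySem.List.max?_id_cons, List.foldl_append]
  simp only [List.foldl]
  congr 1
  omega

-- loop invariant: A's recursive build equals B's fold, and its max is the fold's tracked last value
lemma pvMain : ∀ n : Int, 2 ≤ n →
    diag_numbers n none = ((PySem.List.pyRange 2 (n+1) 1).foldl pvLevelStep ([1], 1)).1 ∧
    PySem.List.max? (diag_numbers n none) (fun y => y)
      = some ((PySem.List.pyRange 2 (n+1) 1).foldl pvLevelStep ([1], 1)).2 := by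
  intro n hn
  induction n, hn using Int.le_induction with
  | base =>
    rw [diag_numbers]
    norm_num
    rw [diag_numbers]
    norm_num [PySem.List.max?_id_cons, pvLevelStep]
    decide
  | succ n hn ih =>
    obtain ⟨h1, h2⟩ := ih
    have hr : PySem.List.pyRange 2 (n+1+1) 1 = PySem.List.pyRange 2 (n+1) 1 ++ [n+1] :=
      PySem.List.pyRange_one_succ_right (by omega)
    set L : Int := ((PySem.List.pyRange 2 (n+1) 1).foldl pvLevelStep ([1], 1)).2 with hL
    obtain ⟨x, t, hxt⟩ : ∃ x t, diag_numbers n none = x :: t := by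
      cases hlist : diag_numbers n none with
      | nil => rw [hlist] at h2; simp [PySem.List.max?] at h2
      | cons x t => exact ⟨x, t, rfl⟩
    have hfm : t.foldl max x = L := by
      rw [hxt, PySem.List.max?_id_cons] at h2
      exact Option.some.inj h2
    rw [h1] at h2 hxt
    rw [diag_numbers]
    have hne : ¬ (n + 1 = 1) := by omega
    rw [if_neg hne, dif_pos (show 2 ≤ n + 1 by omega)]
    have hsub : n + 1 - 1 = n := by ring
    rw [hsub, h1, hr, List.foldl_append]
    simp only [List.foldl]
    rw [h2]
    constructor
    · simp only [pvLevelStep]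
      congr 1
      simp only [List.cons.injEq, and_true]
      refine ⟨by ring, by ring, by ring, by ring⟩
    · rw [hxt]
      rw [pvMax4 x t _ _ _ _ (by omega) (by omega) (by omega) (by omega)]
      simp only [pvLevelStep]
      congr 1
      ring

-- ===== VERDICT (by name: the statement is the Claim_ definition above) =====
theorem diag_numbers_spec : Claim_equal_diag_numbers := by
  intro n prev hdom hpre
  unfold Spec_diag_numbers
  by_cases h1 : n = 1
  · rw [diag_numbers.eq_def, diag_numbers_alt.eq_def]
    simp [h1]
  · cases prev with
    | none =>
      have hn : 2 ≤ n := by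
        rcases hpre with h | ⟨h, _⟩
        · exact absurd h h1
        · exact h rfl
      rw [diag_numbers_alt, if_neg h1]
      exact (pvMain n hn).1
    | some l =>
      rw [diag_numbers.eq_def, diag_numbers_alt]
      simp only [if_neg h1]
      cases hm : PySem.List.max? l (fun x => x) with
      | none => simp
      | some last =>
        have hs : (2*n - 1 : Int) - 1 = 2*(n-1) := by ring
        simp only [hs]
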